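-- pv_equiv track=rewrite | github.com/bhaskerrai/LeetCode-DSA | 02_Arrays-Strings/waysToSplit.py | fn
-- ===== SOURCE A (Python) =====
-- from typing import List
--
-- def fn(nums: List[int]) -> int:
--     prefix = [nums[0]]
--
--     for i in range(1, len(nums)):
--         prefix.append(prefix[-1] + nums[i])
--
--
--     ans = 0
--
--     for i in range(len(nums) - 1):
--         left_section = prefix[i]
--         right_section = prefix[-1] - prefix[i]
--
--         if left_section >= right_section:
--             ans += 1
--
--     return ans
-- ===== SOURCE B (Python) =====
-- def fn(nums):
--     total = nums[0] + sum(nums[1:])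
--     ans = 0
--     right = 0
--     for x in reversed(nums[1:]):
--         right += x
--         if total - right >= right:
--             ans += 1
--     return ans
-- ===== Notes on version B (the rewrite author's own statement) =====
-- stated objective: alternative
-- what changed: B scans the array backwards maintaining the running suffix sum and counts splits via the equivalent condition total - right >= right, instead of A's forward precomputed prefix-sum table scanned front-to-back.
import Mathlib
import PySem

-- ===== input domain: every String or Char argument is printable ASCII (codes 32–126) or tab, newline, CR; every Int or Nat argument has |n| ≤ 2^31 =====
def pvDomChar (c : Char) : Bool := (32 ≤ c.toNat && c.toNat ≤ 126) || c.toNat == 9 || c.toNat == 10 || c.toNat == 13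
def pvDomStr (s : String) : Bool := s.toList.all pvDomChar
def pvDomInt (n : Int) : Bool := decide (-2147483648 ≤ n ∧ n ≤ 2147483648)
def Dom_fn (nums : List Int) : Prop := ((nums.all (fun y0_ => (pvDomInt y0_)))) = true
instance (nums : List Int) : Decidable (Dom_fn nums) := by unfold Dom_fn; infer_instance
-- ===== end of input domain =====

-- B scans backwards keeping the running suffix sum (total - right >= right) instead of A's forward prefix-sum table.

-- ===== PORT A =====
def fn (nums : List Int) : Int :=
  let pfx : List Int :=
    (PySem.List.pyRange 1 (nums.length : Int) 1).foldl
      (fun p i => p ++ [PySem.List.pyGetD p (-1) 0 + PySem.List.pyGetD nums i 0])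
      [PySem.List.pyGetD nums 0 0]
  (PySem.List.pyRange 0 ((nums.length : Int) - 1) 1).foldl
    (fun ans i =>
      let left_section := PySem.List.pyGetD pfx i 0
      let right_section := PySem.List.pyGetD pfx (-1) 0 - PySem.List.pyGetD pfx i 0
      if left_section ≥ right_section then ans + 1 else ans) 0

-- ===== PORT B =====
def fn_alt (nums : List Int) : Int :=
  let total : Int := PySem.List.pyGetD nums 0 0 + (PySem.List.slice nums (some 1) none).sum
  let s : Int × Int :=
    ((PySem.List.slice nums (some 1) none).reverse).foldl
      (fun (s : Int × Int) x =>
        (s.1 + x, if total - (s.1 + x) ≥ s.1 + x then s.2 + 1 else s.2)) (0, 0)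
  s.2

-- ===== PRECONDITION & SPEC =====
-- Pre_ excludes only the empty list, on which A (and B) raise IndexError indexing the first element.
def Pre_fn (nums : List Int) : Prop := nums ≠ []
instance (nums : List Int) : Decidable (Pre_fn nums) := by unfold Pre_fn; infer_instance
def pvWitness_fn : List Int := [3, 1, 2]

def Spec_fn (nums : List Int) (out : Int) : Prop := out = fn_alt nums
instance (nums : List Int) (out : Int) : Decidable (Spec_fn nums out) := by unfold Spec_fn; infer_instance

-- ===== CLAIM (what is proved, stated in full; the proofs are below) =====
def Claim_equal_fn : Prop := ∀ (nums : List Int), Dom_fn nums → Pre_fn nums → Spec_fn nums (fn nums)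

-- ===== LEMMAS AND PROOFS =====

-- sum of the first (m+1) elements = sum of the first m plus nums[m] (default 0 past the end)
theorem pv_take_succ_sum (nums : List Int) (m : Nat) :
    (nums.take (m + 1)).sum = (nums.take m).sum + nums.getD m 0 := by
  rw [List.take_add_one, List.sum_append, List.getD_eq_getElem?_getD]
  cases nums[m]? <;> simp

-- last element of a partial-sums list built over List.range
theorem pv_getLast_map_range (f : Nat → Int) (m : Nat) (hm : 1 ≤ m) :
    PySem.List.pyGetD ((List.range m).map f) (-1) 0 = f (m - 1) := by
  have hne : (List.range m).map f ≠ [] := by simp; omega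
  rw [PySem.List.pyGetD_neg_one _ _ hne, List.getLast_eq_getElem]
  simp

-- A's prefix list is the list of partial sums
theorem pv_prefix_char (nums : List Int) (hne : nums ≠ []) :
    ∀ (m : Nat), 1 ≤ m →
      (PySem.List.pyRange 1 (m : Int) 1).foldl
        (fun p i => p ++ [PySem.List.pyGetD p (-1) 0 + PySem.List.pyGetD nums i 0])
        [PySem.List.pyGetD nums 0 0]
      = (List.range m).map (fun k => (nums.take (k + 1)).sum) := by
  intro m hm
  induction m with
  | zero => omega
  | succ m ih =>
    by_cases hm1 : 1 ≤ m
    · have hcast : ((m + 1 : Nat) : Int) = (m : Int) + 1 := by push_cast; ring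
      rw [hcast, PySem.List.pyRange_one_succ_right (by exact_mod_cast hm1),
          List.foldl_append, ih hm1]
      rw [List.foldl_cons, List.foldl_nil,
          pv_getLast_map_range _ m hm1, PySem.List.pyGetD_natCast,
          List.range_succ, List.map_append, List.map_cons, List.map_nil]
      have : m - 1 + 1 = m := by omega
      rw [this, ← pv_take_succ_sum]
    · have hm0 : m = 0 := by omega
      subst hm0
      rw [PySem.List.pyRange_one_eq_nil (by norm_num), List.foldl_nil]
      cases nums with
      | nil => exact absurd rfl hne
      | cons x xs => simp [PySem.List.pyGetD_zero_cons]

-- A computes the count over forward indices of the prefix-sum condition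
theorem pv_A_char (nums : List Int) (hne : nums ≠ []) :
    fn nums = ((List.range (nums.length - 1)).countP
      (fun k => decide ((nums.take (k + 1)).sum ≥ nums.sum - (nums.take (k + 1)).sum)) : Int) := by
  have hlen : 1 ≤ nums.length := List.length_pos_iff.mpr hne
  simp only [fn]
  rw [pv_prefix_char nums hne nums.length hlen]
  have hcong :
      (PySem.List.pyRange 0 ((nums.length : Int) - 1) 1).foldl
        (fun (ans : Int) i =>
          if PySem.List.pyGetD ((List.range nums.length).map (fun k => (nums.take (k + 1)).sum)) i 0 ≥
              PySem.List.pyGetD ((List.range nums.length).map (fun k => (nums.take (k + 1)).sum)) (-1) 0 -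
                PySem.List.pyGetD ((List.range nums.length).map (fun k => (nums.take (k + 1)).sum)) i 0
          then ans + 1 else ans) 0
      = (PySem.List.pyRange 0 ((nums.length : Int) - 1) 1).foldl
        (fun (ans : Int) i =>
          if (nums.take (i.toNat + 1)).sum ≥ nums.sum - (nums.take (i.toNat + 1)).sum
          then ans + 1 else ans) 0 := by
    apply PySem.List.foldl_congr_mem
    intro acc i hi
    rw [PySem.List.mem_pyRange_one] at hi
    have h0 : 0 ≤ i := hi.1
    have h1 : i < (nums.length : Int) := by omega
    have hget : PySem.List.pyGetD ((List.range nums.length).map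
        (fun k => (nums.take (k + 1)).sum)) i 0 = (nums.take (i.toNat + 1)).sum := by
      rw [PySem.List.pyGetD_eq_getElem _ 0 h0 (by simpa using h1)]
      simp
    have hlast : PySem.List.pyGetD ((List.range nums.length).map
        (fun k => (nums.take (k + 1)).sum)) (-1) 0 = nums.sum := by
      rw [pv_getLast_map_range _ nums.length hlen]
      have : nums.length - 1 + 1 = nums.length := by omega
      rw [this, List.take_length]
    simp only [hget, hlast]
  refine Eq.trans hcong ?_
  rw [PySem.List.foldl_ite_add_one, PySem.List.pyRange_one, List.countP_map]
  have : ((nums.length : Int) - 1 - 0).toNat = nums.length - 1 := by omega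
  rw [this, zero_add]
  congr 2
  funext k
  simp

-- B's pair fold: first component is the running sum, second counts the suffix condition
theorem pv_rfold (total : Int) (ys : List Int) : ∀ (r0 a0 : Int),
    ys.foldl
      (fun (s : Int × Int) x =>
        (s.1 + x, if total - (s.1 + x) ≥ s.1 + x then s.2 + 1 else s.2)) (r0, a0)
    = (r0 + ys.sum,
       a0 + ((List.range ys.length).countP
         (fun k => decide (total - (r0 + (ys.take (k + 1)).sum) ≥ r0 + (ys.take (k + 1)).sum)) : Int)) := by
  induction ys with
  | nil => intro r0 a0; simp
  | cons x ys ih =>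
    intro r0 a0
    rw [List.foldl_cons, ih]
    simp only [Prod.mk.injEq]
    constructor
    · simp; ring
    · simp only [List.length_cons, List.range_succ_eq_map, List.countP_cons, List.countP_map]
      simp only [List.take_succ_cons, List.sum_cons, Function.comp_def, Nat.succ_eq_add_one]
      have harg : ∀ k, r0 + (x + (ys.take (k + 1)).sum) = r0 + x + (ys.take (k + 1)).sum := by
        intro k; ring
      simp only [harg]
      simp only [List.take_zero, List.sum_nil, add_zero, decide_eq_true_eq]
      split_ifs with h
      · push_cast; ring
      · push_cast; ring

-- reflecting the index set of a count over range
theorem pv_countP_reflect (p : Nat → Bool) (m : Nat) :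
    (List.range m).countP (fun k => p (m - 1 - k)) = (List.range m).countP p := by
  have hmap : (List.range m).map (fun k => m - 1 - k) = (List.range m).reverse := by
    rw [List.range_eq_range', List.reverse_range']
    simp
    rw [← List.range_eq_range']
  calc (List.range m).countP (fun k => p (m - 1 - k))
      = ((List.range m).map (fun k => m - 1 - k)).countP p := by
        rw [List.countP_map]; rfl
    _ = ((List.range m).reverse).countP p := by rw [hmap]
    _ = (List.range m).countP p := by simp

theorem pv_main (nums : List Int) (hne : nums ≠ []) : fn nums = fn_alt nums := by
  cases nums with
  | nil => exact absurd rfl hne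
  | cons x xs =>
    rw [pv_A_char (x :: xs) hne]
    simp only [fn_alt, PySem.List.slice_from_one, List.tail_cons, PySem.List.pyGetD_zero_cons]
    rw [pv_rfold (x + xs.sum) xs.reverse 0 0]
    simp only [List.length_reverse, List.length_cons, Nat.add_sub_cancel, zero_add]
    have htake : ∀ k, k < xs.length →
        (xs.reverse.take (k + 1)).sum = (xs.drop (xs.length - 1 - k)).sum := by
      intro k hk
      rw [List.take_reverse, List.sum_reverse]
      have : xs.length - (k + 1) = xs.length - 1 - k := by omega
      rw [this]
    have hB : (List.range xs.length).countP
        (fun k => decide (x + xs.sum - (xs.reverse.take (k + 1)).sum ≥ (xs.reverse.take (k + 1)).sum))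
        = (List.range xs.length).countP
        (fun k => decide (x + xs.sum - (xs.drop (xs.length - 1 - k)).sum ≥ (xs.drop (xs.length - 1 - k)).sum)) := by
      apply List.countP_congr
      intro k hk
      rw [List.mem_range] at hk
      simp only [htake k hk]
    have hA : (List.range xs.length).countP
        (fun k => decide (((x :: xs).take (k + 1)).sum ≥
          (x :: xs).sum - ((x :: xs).take (k + 1)).sum))
        = (List.range xs.length).countP
        (fun k => decide (x + xs.sum - (xs.drop k).sum ≥ (xs.drop k).sum)) := by
      apply List.countP_congr
      intro k hk
      have hsplit : ((x :: xs).take (k + 1)).sum = (x :: xs).sum - ((x :: xs).drop (k + 1)).sum := by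
        have h1 := List.take_append_drop (k + 1) (x :: xs)
        have hsum : ((x :: xs).take (k + 1)).sum + ((x :: xs).drop (k + 1)).sum = (x :: xs).sum := by
          rw [← List.sum_append, h1]
        omega
      simp only [hsplit, List.sum_cons, List.drop_succ_cons]
      simp only [decide_eq_true_eq]
      constructor <;> intro h2 <;> omega
    have hrefl := pv_countP_reflect
      (fun k => decide (x + xs.sum - (xs.drop k).sum ≥ (xs.drop k).sum)) xs.length
    have hgoal : (List.range xs.length).countP
        (fun k => decide (((x :: xs).take (k + 1)).sum ≥
          (x :: xs).sum - ((x :: xs).take (k + 1)).sum))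
        = (List.range xs.length).countP
        (fun k => decide (x + xs.sum - (xs.reverse.take (k + 1)).sum ≥ (xs.reverse.take (k + 1)).sum)) := by
      rw [hA, hB, hrefl]
    exact_mod_cast congrArg (fun n : Nat => (n : Int)) hgoal

-- ===== VERDICT (by name: the statement is the Claim_ definition above) =====
theorem fn_spec : Claim_equal_fn := by
  intro nums _ hpre
  exact pv_main nums hpre
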